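-- pv_equiv track=rewrite | github.com/gmlgml5023/CodingTest | 프로그래머스/unrated/120902. 문자열 계산하기/문자열 계산하기.py | solution
-- ===== SOURCE A (Python) =====
-- def solution(my_string):
--     s = my_string.split()
--     answer = int(my_string.split()[0])
--     for i in range(1, len(s), 2):
--         if s[i] == '+':
--             answer += int(s[i+1])
--         else:
--             answer -= int(s[i+1])
--
--     return answer
-- ===== SOURCE B (Python) =====
-- def solution(my_string):
--     # Consume the token list from the RIGHT as a stack: repeatedly pop the last
--     # operand and its operator and accumulate the signed value; correct because
--     # with only +/- each operand's sign depends solely on its own operator.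
--     toks = my_string.split()
--     total = 0
--     while len(toks) > 1:
--         v = int(toks.pop())
--         op = toks.pop()
--         total += v if op == '+' else -v
--     return total + int(toks[0])
-- ===== Notes on version B (the rewrite author's own statement) =====
-- stated objective: alternative
-- what changed: Instead of A's left-to-right index scan over range(1, len(s), 2) reading s[i], s[i+1], B treats the token list as a stack consumed from the RIGHT: a while-loop pops the last operand and its operator, accumulates the signed value, and finally adds the remaining first operand.
import Mathlib
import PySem

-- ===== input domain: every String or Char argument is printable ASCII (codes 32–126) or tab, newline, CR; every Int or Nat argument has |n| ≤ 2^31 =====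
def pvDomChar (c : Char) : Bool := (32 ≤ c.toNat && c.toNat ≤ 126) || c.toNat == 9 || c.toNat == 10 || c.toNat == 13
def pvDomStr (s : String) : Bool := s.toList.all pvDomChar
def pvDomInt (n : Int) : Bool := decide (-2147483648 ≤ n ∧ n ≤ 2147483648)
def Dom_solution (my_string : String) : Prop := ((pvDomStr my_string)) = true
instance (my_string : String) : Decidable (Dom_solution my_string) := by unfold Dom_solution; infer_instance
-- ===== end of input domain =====

-- B replaces A's left-to-right index scan by a stack consumed from the right: a while-loop
-- pops the last operand and its operator, accumulates the signed value, then adds the first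
-- operand (same cost; a genuinely different traversal).  B mutates its local list only.

-- ===== PORT A =====
-- int(t) is totalized with `.getD 0`; inputs where Python's int() raises are outside Pre_solution.
def solution (my_string : String) : Int :=
  let s := PySem.Str.split₀ my_string
  let answer : Int := ((PySem.List.pyGet? s 0).bind PySem.Int.ofStr?).getD 0
  (PySem.List.pyRange 1 (s.length : Int) 2).foldl
    (fun answer i =>
      if PySem.List.pyGet? s i = some "+" then
        answer + ((PySem.List.pyGet? s (i + 1)).bind PySem.Int.ofStr?).getD 0
      else
        answer - ((PySem.List.pyGet? s (i + 1)).bind PySem.Int.ofStr?).getD 0)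
    answer

-- ===== PORT B =====
-- `toks.pop()` on a nonempty list is PySem.List.pop? (default index -1), totalized with
-- `.getD ("", [])` (pop? is `some` whenever the while-guard 1 < len holds; see pvPop_nonempty).
theorem pvPop_nonempty {α : Type} (xs : List α) (h : xs ≠ []) :
    PySem.List.pop? xs = some (xs.getLast h, xs.dropLast) := by
  conv_lhs => rw [← List.dropLast_concat_getLast h]
  rw [PySem.List.pop?_last]

-- The while-loop popping from the end of `toks`: state = (remaining tokens, total).
def pvGoB (toks : List String) (total : Int) : List String × Int :=
  if 1 < toks.length then
    let p1 := (PySem.List.pop? toks).getD ("", [])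
    let v := (PySem.Int.ofStr? p1.1).getD 0
    let p2 := (PySem.List.pop? p1.2).getD ("", [])
    pvGoB p2.2 (total + if p2.1 = "+" then v else -v)
  else (toks, total)
termination_by toks.length
decreasing_by
  have h1 : toks ≠ [] := by intro e; simp [e] at *
  rw [pvPop_nonempty toks h1]
  simp only [Option.getD_some]
  have h2 : toks.dropLast ≠ [] := by
    intro e
    have := congrArg List.length e
    simp [List.length_dropLast] at this
    omega
  rw [pvPop_nonempty _ h2]
  simp only [Option.getD_some]
  have e1 : toks.dropLast.length = toks.length - 1 := List.length_dropLast
  have e2 : toks.dropLast.dropLast.length = toks.dropLast.length - 1 := List.length_dropLast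
  omega

def solution_alt (my_string : String) : Int :=
  let r := pvGoB (PySem.Str.split₀ my_string) 0
  r.2 + ((PySem.List.pyGet? r.1 0).bind PySem.Int.ofStr?).getD 0

-- ===== PRECONDITION & SPEC =====
-- Pre_ admits exactly the inputs where Python A returns: an odd number of tokens (an empty
-- string raises IndexError on s[0], a trailing operator raises IndexError on s[i+1]) whose
-- even-position tokens all parse as Python ints (otherwise int() raises ValueError).
def Pre_solution (my_string : String) : Prop :=
  (PySem.Str.split₀ my_string).length % 2 = 1 ∧
    ∀ i : Nat, i < (PySem.Str.split₀ my_string).length → i % 2 = 0 →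
      (PySem.Int.ofStr? ((PySem.Str.split₀ my_string).getD i "")).isSome
instance (my_string : String) : Decidable (Pre_solution my_string) := by
  unfold Pre_solution; infer_instance

def pvWitness_solution : String := "1 + 2"

def Spec_solution (my_string : String) (out : Int) : Prop := out = solution_alt my_string
instance (my_string : String) (out : Int) : Decidable (Spec_solution my_string out) := by
  unfold Spec_solution; infer_instance

-- ===== CLAIM (what is proved, stated in full; the proofs are below) =====
def Claim_equal_solution : Prop := ∀ (my_string : String), Dom_solution my_string → Pre_solution my_string → Spec_solution my_string (solution my_string)

-- ===== LEMMAS AND PROOFS =====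

-- Signed value of one operator/operand pair (shared spec of both loops).
def pvSigned (p : String × String) : Int :=
  if p.1 = "+" then ((PySem.Int.ofStr? p.2)).getD 0 else -((PySem.Int.ofStr? p.2)).getD 0

def pvPairUp {α : Type} : List α → List (α × α)
  | x :: y :: rest => (x, y) :: pvPairUp rest
  | _ => []

theorem pvPyRange_two_cons (a b : Int) (h : a < b) :
    PySem.List.pyRange a b 2 = a :: PySem.List.pyRange (a + 2) b 2 := by
  rw [PySem.List.pyRange_of_pos a b (by norm_num),
      PySem.List.pyRange_of_pos (a + 2) b (by norm_num)]
  by_cases h2 : a + 2 < b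
  · have hc : (if a < b then ((b - a + 2 - 1) / 2).toNat else 0)
        = (if a + 2 < b then ((b - (a + 2) + 2 - 1) / 2).toNat else 0) + 1 := by
      simp only [if_pos h, if_pos h2]; omega
    rw [hc, List.range_succ_eq_map]
    simp only [List.map_cons, List.map_map]
    congr 1
    · simp
    · refine List.map_congr_left ?_
      intro k _
      simp [Function.comp]
      ring
  · have hc : (if a < b then ((b - a + 2 - 1) / 2).toNat else 0) = 1 := by
      simp only [if_pos h]; omega
    rw [hc]
    simp [h2]

-- A's foldl over range(1, len, 2), generalized over an arbitrary prefix, computes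
-- acc + the sum of signed pairs of the remainder.
theorem pvLoop_eq (rest : List String) (pre : List String) (acc : Int)
    (h : rest.length % 2 = 0) :
    (PySem.List.pyRange (pre.length : Int) ((pre.length : Int) + (rest.length : Int)) 2).foldl
      (fun answer i =>
        if PySem.List.pyGet? (pre ++ rest) i = some "+" then
          answer + ((PySem.List.pyGet? (pre ++ rest) (i + 1)).bind PySem.Int.ofStr?).getD 0
        else
          answer - ((PySem.List.pyGet? (pre ++ rest) (i + 1)).bind PySem.Int.ofStr?).getD 0)
      acc
    = acc + ((pvPairUp rest).map pvSigned).sum := by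
  match rest with
  | [] =>
      have hr : PySem.List.pyRange (pre.length : Int) ((pre.length : Int)) 2 = [] := by
        rw [PySem.List.pyRange_of_pos _ _ (by norm_num)]
        simp
      simp [pvPairUp, hr]
  | [op] => simp at h
  | op :: b :: rest' =>
      have hlen : ((op :: b :: rest').length : Int) = 2 + (rest'.length : Int) := by
        simp; ring
      have hcons := pvPyRange_two_cons (pre.length : Int)
        ((pre.length : Int) + ((op :: b :: rest').length : Int)) (by rw [hlen]; omega)
      rw [hcons]
      rw [List.foldl_cons]
      have hop : PySem.List.pyGet? (pre ++ op :: b :: rest') (pre.length : Int) = some op :=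
        PySem.List.pyGet?_append_length pre (b :: rest') op
      have hnum : PySem.List.pyGet? (pre ++ op :: b :: rest') ((pre.length : Int) + 1)
          = some b := by
        have := PySem.List.pyGet?_append_right pre (op :: b :: rest') 1
        simpa using this
      have hrec := pvLoop_eq rest' (pre ++ [op, b])
        (if op = "+" then acc + ((PySem.Int.ofStr? b).getD 0)
         else acc - ((PySem.Int.ofStr? b).getD 0))
        (by have hh := h; simp only [List.length_cons] at hh; omega)
      have hpre2 : ((pre ++ [op, b]).length : Int) = (pre.length : Int) + 2 := by
        simp
      have happ : (pre ++ [op, b]) ++ rest' = pre ++ op :: b :: rest' := by simp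
      rw [hpre2, happ] at hrec
      have hstop : (pre.length : Int) + ((op :: b :: rest').length : Int)
          = (pre.length : Int) + 2 + (rest'.length : Int) := by rw [hlen]; ring
      rw [hstop]
      rw [hop, hnum]
      simp only [Option.bind_some, Option.some.injEq]
      rw [hrec]
      simp only [pvPairUp, List.map_cons, List.sum_cons, pvSigned]
      split_ifs <;> ring
termination_by rest.length

-- pairing appends a trailing pair when the list so far has even length
theorem pvPairUp_append {α : Type} (rest : List α) (op b : α) (h : rest.length % 2 = 0) :
    pvPairUp (rest ++ [op, b]) = pvPairUp rest ++ [(op, b)] := by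
  match rest with
  | [] => simp [pvPairUp]
  | [x] => simp at h
  | x :: y :: rest' =>
      simp only [List.cons_append, pvPairUp, List.length_cons] at *
      rw [pvPairUp_append rest' op b (by omega)]

-- One iteration of B's while-loop, seen from the right end of the list.
theorem pvGoB_step (head : String) (rest' : List String) (op b : String) (total : Int) :
    pvGoB (head :: (rest' ++ [op, b])) total
      = pvGoB (head :: rest') (total + pvSigned (op, b)) := by
  rw [pvGoB.eq_def]
  have hlen : 1 < (head :: (rest' ++ [op, b])).length := by simp
  rw [if_pos hlen]
  have h1 : PySem.List.pop? (head :: (rest' ++ [op, b]))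
      = some (b, head :: (rest' ++ [op])) := by
    have := PySem.List.pop?_last ((head :: rest') ++ [op]) b
    simpa using this
  have h2 : PySem.List.pop? (head :: (rest' ++ [op])) = some (op, head :: rest') := by
    have := PySem.List.pop?_last (head :: rest') op
    simpa using this
  simp only [h1, h2, Option.getD_some]
  simp [pvSigned]

-- B's loop on an odd-length token list stops at the singleton head.
theorem pvGoB_spec (head : String) (rest : List String) (total : Int)
    (h : rest.length % 2 = 0) :
    pvGoB (head :: rest) total = ([head], total + ((pvPairUp rest).map pvSigned).sum) := by
  match hrev : rest.reverse with
  | [] =>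
      have : rest = [] := by simpa using congrArg List.reverse hrev
      subst this
      rw [pvGoB.eq_def]
      simp [pvPairUp]
  | [x] =>
      have : rest = [x] := by simpa using congrArg List.reverse hrev
      subst this
      simp at h
  | b :: op :: tl =>
      have hrest : rest = tl.reverse ++ [op, b] := by
        have := congrArg List.reverse hrev
        simpa using this
      subst hrest
      have htl : tl.reverse.length % 2 = 0 := by
        simp only [List.length_append, List.length_reverse, List.length_cons,
          List.length_nil] at h ⊢
        omega
      rw [pvGoB_step, pvGoB_spec head tl.reverse _ htl,
          pvPairUp_append tl.reverse op b htl]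
      simp only [List.map_append, List.sum_append, List.map_cons, List.map_nil,
        List.sum_cons, List.sum_nil]
      ring_nf
termination_by rest.length
decreasing_by
  rw [hrest]
  simp only [List.length_append, List.length_reverse, List.length_cons, List.length_nil]
  omega

-- ===== VERDICT (by name: the statement is the Claim_ definition above) =====
theorem solution_spec : Claim_equal_solution := by
  intro my_string _ hpre
  unfold Spec_solution solution solution_alt
  obtain ⟨hodd, -⟩ := hpre
  cases hs : PySem.Str.split₀ my_string with
  | nil => rw [hs] at hodd; simp at hodd
  | cons head rest =>
      rw [hs] at hodd
      simp only [List.length_cons, Nat.succ_mod_two_eq_one_iff] at hodd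
      simp only []
      have h0 : PySem.List.pyGet? (head :: rest) (0 : Int) = some head := by
        simp
      rw [h0]
      rw [pvGoB_spec head rest 0 hodd]
      simp only [PySem.List.pyGet?_zero_cons, Option.bind_some, zero_add]
      rw [add_comm]
      have hkey := pvLoop_eq rest [head] ((PySem.Int.ofStr? head).getD 0) hodd
      simp only [List.length_cons, List.singleton_append] at hkey ⊢
      have hcast : ((rest.length + 1 : Nat) : Int) = (1 : Int) + (rest.length : Int) := by
        push_cast; ring
      rw [hcast]
      simpa using hkey
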